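-- pv_equiv track=rewrite | github.com/TenzinPlatter/myshell | myParsing.py | replace_substr
-- ===== SOURCE A (Python) =====
-- def replace_substr(string, substr, start, end):
--     """replaces the string between start and end indexes with substr
--     start and end are inclusive for substr position"""
--     result = ""
--     added = False
--     for i in range(len(string)):
--         if i < start or i > end:
--             result += string[i]
--         elif not added:
--             result += substr
--             added = True
--     return result
-- ===== SOURCE B (Python) =====
-- def replace_substr(string, substr, start, end):
--     """replaces the string between start and end indexes with substr
--     start and end are inclusive for substr position"""
--     lo = max(start, 0)
--     hi = min(end, len(string) - 1)
--     if lo > hi: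
--         return string
--     return string[:lo] + substr + string[hi + 1:]
-- ===== Notes on version B (the rewrite author's own statement) =====
-- stated objective: simpler
-- what changed: The per-character loop with an 'added' flag is replaced by clamping the bounds (lo = max(start,0), hi = min(end, len-1)) and building the result from two slices and a concatenation, with no loop at all.
import Mathlib
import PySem

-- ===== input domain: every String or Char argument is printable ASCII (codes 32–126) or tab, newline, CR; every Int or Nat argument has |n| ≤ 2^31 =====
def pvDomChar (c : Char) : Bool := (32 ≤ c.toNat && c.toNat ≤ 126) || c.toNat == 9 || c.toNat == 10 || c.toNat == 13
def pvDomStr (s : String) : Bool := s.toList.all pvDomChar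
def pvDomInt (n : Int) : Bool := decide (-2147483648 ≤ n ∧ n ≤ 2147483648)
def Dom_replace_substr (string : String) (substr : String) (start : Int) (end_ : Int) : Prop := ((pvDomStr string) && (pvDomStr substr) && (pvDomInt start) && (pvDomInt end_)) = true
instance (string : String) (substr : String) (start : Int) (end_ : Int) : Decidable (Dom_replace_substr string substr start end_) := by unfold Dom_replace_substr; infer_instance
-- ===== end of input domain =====

-- B replaces A's per-character loop with clamped bounds and two slices; objective: simpler (no speed claim).

-- ===== PORT A =====
-- A-side helper: the body of A's for-loop (state = (result, added))
def pvStepA (cs s : List Char) (start end_ : Int) (acc : List Char × Bool) (i : Int) :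
    List Char × Bool :=
  if i < start ∨ i > end_ then
    (acc.1 ++ [PySem.List.pyGetD cs i ' '], acc.2)
  else if acc.2 = false then
    (acc.1 ++ s, true)
  else acc

def replace_substr (string : String) (substr : String) (start : Int) (end_ : Int) : String :=
  let cs := string.toList
  let st : List Char × Bool :=
    (PySem.List.pyRange 0 (PySem.List.len cs) 1).foldl
      (pvStepA cs substr.toList start end_) ([], false)
  String.ofList st.1

-- ===== PORT B =====
def replace_substr_alt (string : String) (substr : String) (start : Int) (end_ : Int) : String :=
  let cs := string.toList
  let lo := max start 0
  let hi := min end_ (PySem.List.len cs - 1)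
  if lo > hi then string
  else String.ofList (PySem.List.slice cs none (some lo) ++ substr.toList ++
                      PySem.List.slice cs (some (hi + 1)) none)

-- ===== PRECONDITION & SPEC =====
def Spec_replace_substr (string : String) (substr : String) (start : Int) (end_ : Int) (out : String) : Prop := out = replace_substr_alt string substr start end_
instance (string : String) (substr : String) (start : Int) (end_ : Int) (out : String) : Decidable (Spec_replace_substr string substr start end_ out) := by unfold Spec_replace_substr; infer_instance

-- ===== CLAIM (what is proved, stated in full; the proofs are below) =====
def Claim_equal_replace_substr : Prop := ∀ (string : String) (substr : String) (start : Int) (end_ : Int), Dom_replace_substr string substr start end_ → Spec_replace_substr string substr start end_ (replace_substr string substr start end_)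

-- ===== LEMMAS AND PROOFS =====

lemma pvStepA_keep (cs s : List Char) (start end_ i : Int) (xs : List Char) (b : Bool)
    (h : i < start ∨ i > end_) :
    pvStepA cs s start end_ (xs, b) i = (xs ++ [PySem.List.pyGetD cs i ' '], b) := by
  simp [pvStepA, h]

lemma pvStepA_skip (cs s : List Char) (start end_ i : Int) (xs : List Char)
    (h : ¬ (i < start ∨ i > end_)) :
    pvStepA cs s start end_ (xs, true) i = (xs, true) := by
  simp [pvStepA, h]

lemma pvStepA_add (cs s : List Char) (start end_ i : Int) (xs : List Char)
    (h : ¬ (i < start ∨ i > end_)) :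
    pvStepA cs s start end_ (xs, false) i = (xs ++ s, true) := by
  simp [pvStepA, h]

/-- Invariant of A's loop after the first `n` indices: if some index `0 ≤ i < n`
lies in `[start, end_]` then the state is
`(take lo ++ substr ++ (take n).drop (end_+1), true)` with `lo = max start 0`,
otherwise `(take n, false)`. -/
lemma replace_substr_loop_inv (cs s : List Char) (start end_ : Int) :
    ∀ n : Nat, n ≤ cs.length →
    (PySem.List.pyRange 0 (n : Int) 1).foldl (pvStepA cs s start end_) ([], false)
    = if max start 0 ≤ min end_ ((n : Int) - 1) then
        (cs.take (max start 0).toNat ++ s ++ (cs.take n).drop (end_ + 1).toNat, true)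
      else (cs.take n, false) := by
  intro n
  induction n with
  | zero =>
      intro _
      rw [PySem.List.pyRange_one_eq_nil (by omega)]
      rw [if_neg (by omega)]
      simp
  | succ n ih =>
      intro hn
      have hn' : n < cs.length := by omega
      have hcast : ((n + 1 : Nat) : Int) = (n : Int) + 1 := by push_cast; ring
      rw [hcast, PySem.List.pyRange_one_succ_right (by omega), List.foldl_append,
        ih (by omega)]
      simp only [List.foldl_cons, List.foldl_nil]
      have hget : PySem.List.pyGetD cs (n : Int) ' ' = cs[n] := by
        simp [List.getD_eq_getElem?_getD, hn']
      have htake : cs.take (n + 1) = cs.take n ++ [cs[n]] := by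
        rw [List.take_add_one]
        simp [hn']
      by_cases hc : ((n : Int) < start ∨ (n : Int) > end_)
      · by_cases hold : max start 0 ≤ min end_ ((n : Int) - 1)
        · -- already replaced; current index must be past end_
          have hend : end_ < (n : Int) := by
            rcases hc with h1 | h1
            · exfalso; omega
            · omega
          rw [if_pos hold, pvStepA_keep _ _ _ _ _ _ _ hc,
            if_pos (show max start 0 ≤ min end_ ((n : Int) + 1 - 1) by omega)]
          rw [htake, List.drop_append_of_le_length (by simp; omega), hget]
          simp
        · -- nothing replaced yet; this index is outside [start, end_] too
          rw [if_neg hold, pvStepA_keep _ _ _ _ _ _ _ hc,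
            if_neg (show ¬ max start 0 ≤ min end_ ((n : Int) + 1 - 1) by
              rcases hc with h1 | h1 <;> omega),
            htake, hget]
      · rw [not_or, not_lt, not_lt] at hc
        obtain ⟨hc1, hc2⟩ := hc
        by_cases hold : max start 0 ≤ min end_ ((n : Int) - 1)
        · -- already replaced: skip
          rw [if_pos hold, pvStepA_skip _ _ _ _ _ _ (by omega),
            if_pos (show max start 0 ≤ min end_ ((n : Int) + 1 - 1) by omega)]
          have hdrop1 : ((cs.take (n + 1)).drop (end_ + 1).toNat) = [] :=
            List.drop_eq_nil_of_le (by simp; omega)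
          have hdrop2 : ((cs.take n).drop (end_ + 1).toNat) = [] :=
            List.drop_eq_nil_of_le (by simp; omega)
          rw [hdrop1, hdrop2]
        · -- first index inside [start, end_]: append substr, set flag
          have hlo : (max start 0) = (n : Int) := by omega
          rw [if_neg hold, pvStepA_add _ _ _ _ _ _ (by omega),
            if_pos (show max start 0 ≤ min end_ ((n : Int) + 1 - 1) by omega)]
          have hdrop : ((cs.take (n + 1)).drop (end_ + 1).toNat) = [] :=
            List.drop_eq_nil_of_le (by simp; omega)
          rw [hdrop, hlo]
          simp

-- ===== VERDICT (by name: the statement is the Claim_ definition above) =====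
theorem replace_substr_spec : Claim_equal_replace_substr := by
  intro string substr start end_ _
  unfold Spec_replace_substr replace_substr replace_substr_alt
  simp only [PySem.List.len_eq]
  rw [replace_substr_loop_inv string.toList substr.toList start end_
      string.toList.length (le_refl _)]
  by_cases h : max start 0 ≤ min end_ ((string.toList.length : Int) - 1)
  · rw [if_pos h, if_neg (by omega)]
    have h0 : (0 : Int) ≤ max start 0 := by omega
    have h1 : (0 : Int) ≤ min end_ ((string.toList.length : Int) - 1) + 1 := by omega
    rw [PySem.List.slice_to _ h0, PySem.List.slice_from _ h1, List.take_length]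
    dsimp only
    by_cases he : end_ ≤ (string.toList.length : Int) - 1
    · have hm : (end_ + 1).toNat = (min end_ ((string.toList.length : Int) - 1) + 1).toNat := by
        omega
      rw [hm]
    · rw [List.drop_eq_nil_of_le (by omega), List.drop_eq_nil_of_le (by omega)]
  · rw [if_neg h, if_pos (by omega), List.take_length, String.ofList_toList]
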